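-- pv_equiv track=rewrite | github.com/kristoferfannar/leetcode | problems/1807. Evaluate the Bracket Pairs of a String/python/main.py | evaluate
-- ===== SOURCE A (Python) =====
-- from typing import List
--
-- def evaluate(s: str, knowledge: List[List[str]]) -> str:
--     out = ""
--     lookup = {k: v for k, v in knowledge}
--     idx = 0
--
--     while (open := s.find("(", idx)) != -1:
--         close = s.find(")", open)
--         substr = s[open + 1 : close]
--
--         out += s[idx:open]
--
--         if substr in lookup:
--             out += lookup[substr]
--         else:
--             out += "?"
--
--         idx = close + 1
--
--     out += s[idx:]
--
--     return out
-- ===== SOURCE B (Python) =====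
-- def evaluate(s, knowledge):
--     lookup = dict(knowledge)
--     res = ""
--     buf = ""
--     in_key = False
--     for c in s:
--         if in_key:
--             if c == ')':
--                 res += lookup.get(buf, "?")
--                 in_key = False
--             else:
--                 buf += c
--         elif c == '(':
--             in_key = True
--             buf = ""
--         else:
--             res += c
--     return res
-- ===== Notes on version B (the rewrite author's own statement) =====
-- stated objective: idiomatic
-- what changed: A repeatedly calls str.find for '(' and ')' and concatenates slices; B is a single left-to-right character scan with an in_key flag and a key buffer, looking each key up with dict.get.
import Mathlib
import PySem

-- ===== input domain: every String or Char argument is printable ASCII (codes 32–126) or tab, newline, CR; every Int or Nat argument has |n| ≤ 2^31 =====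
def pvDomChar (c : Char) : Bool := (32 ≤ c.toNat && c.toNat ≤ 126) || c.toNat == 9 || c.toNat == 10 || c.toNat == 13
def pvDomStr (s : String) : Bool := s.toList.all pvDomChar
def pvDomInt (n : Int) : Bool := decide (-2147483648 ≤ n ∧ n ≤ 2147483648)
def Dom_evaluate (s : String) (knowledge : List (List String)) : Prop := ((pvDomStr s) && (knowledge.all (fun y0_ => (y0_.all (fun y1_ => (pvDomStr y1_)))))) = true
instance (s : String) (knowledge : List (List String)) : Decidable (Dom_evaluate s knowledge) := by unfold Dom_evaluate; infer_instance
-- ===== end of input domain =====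

-- B replaces A's repeated str.find / slice loop by a single left-to-right character scan
-- with an in_key flag and a key buffer (idiomatic one-pass rewrite; return values only, no mutation).

-- ===== PORT A =====
-- A's while-loop: each iteration consumes one "(...)" group; 'fuel' only bounds the number of
-- iterations (one per '(' in s, so s.length+1 is enough wherever the Python loop terminates;
-- on an unmatched '(' the Python loops forever, which Pre_evaluate excludes).
def evaluateLoopA (lookup : PySem.Dict String String) (s : String) (idx : Int) (out : String) : Nat → String
  | 0 => out
  | fuel + 1 =>
    let opn := PySem.Str.findFrom s "(" idx
    if opn = -1 then
      out ++ PySem.Str.slice s (some idx) none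
    else
      let close := PySem.Str.findFrom s ")" opn
      let substr := PySem.Str.slice s (some (opn + 1)) (some close)
      let out1 := out ++ PySem.Str.slice s (some idx) (some opn)
      let out2 := if lookup.contains substr then out1 ++ lookup.getD substr "?" else out1 ++ "?"
      evaluateLoopA lookup s (close + 1) out2 fuel

def evaluate (s : String) (knowledge : List (List String)) : String :=
  -- {k: v for k, v in knowledge}; a non-pair entry raises ValueError in Python (excluded by Pre_)
  let lookup : PySem.Dict String String :=
    knowledge.foldl (fun d kv => match kv with | [k, v] => d.insert k v | _ => d) PySem.Dict.empty
  evaluateLoopA lookup s 0 "" (s.toList.length + 1)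

-- ===== PORT B =====
-- one scanner step for a character c on the state (res, buf, in_key)
def scanStep (lookup : PySem.Dict String String) (st : String × String × Bool) (c : Char) : String × String × Bool :=
  let (res, buf, inKey) := st
  if inKey then
    if c = ')' then (res ++ lookup.getD buf "?", buf, false)
    else (res, buf.push c, true)
  else if c = '(' then (res, "", true)
  else (res.push c, buf, false)

def evaluate_alt (s : String) (knowledge : List (List String)) : String :=
  -- dict(knowledge): each [key, value] entry is unpacked positionally; a non-pair entry
  -- raises ValueError in Python (excluded by Pre_)
  let lookup : PySem.Dict String String :=
    knowledge.foldl (fun d kv => d.insert (kv.headD "") (kv.tail.headD "")) PySem.Dict.empty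
  (s.toList.foldl (scanStep lookup) ("", "", false)).1

-- ===== PRECONDITION & SPEC =====
-- Pre_ excludes (a) knowledge entries that are not [key, value] pairs — Python's unpacking /
-- dict() raises ValueError there in both A and B — and (b) strings containing a '(' with no ')'
-- after it, on which A's while-loop never terminates; B would return a value there.
def Pre_evaluate (s : String) (knowledge : List (List String)) : Prop :=
  (knowledge.all (fun kv => kv.length = 2)) = true ∧
  (∀ i < s.toList.length, s.toList[i]? = some '(' → ')' ∈ s.toList.drop i)
instance (s : String) (knowledge : List (List String)) : Decidable (Pre_evaluate s knowledge) := by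
  unfold Pre_evaluate; infer_instance

def pvWitness_evaluate : String × List (List String) := ("hi (name) and (x)!", [["name", "bob"], ["a", "b"]])

def Spec_evaluate (s : String) (knowledge : List (List String)) (out : String) : Prop := out = evaluate_alt s knowledge
instance (s : String) (knowledge : List (List String)) (out : String) : Decidable (Spec_evaluate s knowledge out) := by unfold Spec_evaluate; infer_instance

-- ===== CLAIM =====
def Claim_equal_evaluate : Prop := ∀ (s : String) (knowledge : List (List String)), Dom_evaluate s knowledge → Pre_evaluate s knowledge → Spec_evaluate s knowledge (evaluate s knowledge)

-- ===== LEMMAS AND PROOFS =====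

-- the bracket condition of Pre_, as a predicate on the character list
def PreB (cs : List Char) : Prop := ∀ i < cs.length, cs[i]? = some '(' → ')' ∈ cs.drop i

lemma preB_drop {cs : List Char} (h : PreB cs) (n : Nat) : PreB (cs.drop n) := by
  intro i hi hc
  simp only [List.length_drop] at hi
  have h2 : (cs.drop n)[i]? = cs[n + i]? := by
    rw [List.getElem?_drop]
  have := h (n + i) (by omega) (h2 ▸ hc)
  simpa [List.drop_drop, Nat.add_comm] using this

-- common reference evaluator: copy chars up to '(', look the key up, recurse after the ')'
def evalRef (lookup : PySem.Dict String String) (cs : List Char) : List Char :=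
  if h : '(' ∈ cs then
    let pre := cs.takeWhile (fun x => x != '(')
    let rest := (cs.dropWhile (fun x => x != '(')).tail
    let key := rest.takeWhile (fun x => x != ')')
    let rest' := (rest.dropWhile (fun x => x != ')')).tail
    pre ++ (lookup.getD (String.ofList key) "?").toList ++ evalRef lookup rest'
  else cs
termination_by cs.length
decreasing_by
  have hne : cs.dropWhile (fun x => x != '(') ≠ [] := by
    intro he
    have := List.dropWhile_eq_nil_iff.mp he '(' h
    simp at this
  have h1 : (cs.dropWhile (fun x => x != '(')).length ≤ cs.length := List.length_dropWhile_le _ _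
  have h2 : 0 < (cs.dropWhile (fun x => x != '(')).length := List.length_pos_of_ne_nil hne
  have h3 := List.length_dropWhile_le (fun x => x != ')') ((cs.dropWhile (fun x => x != '(')).tail)
  simp only [List.length_tail] at h3 ⊢
  omega

lemma split_first (c : Char) (l : List Char) (h : c ∈ l) :
    l = l.takeWhile (fun x => x != c) ++ c :: (l.dropWhile (fun x => x != c)).tail ∧
    c ∉ l.takeWhile (fun x => x != c) := by
  have hne : l.dropWhile (fun x => x != c) ≠ [] := by
    intro he
    have := List.dropWhile_eq_nil_iff.mp he c h
    simp at this
  have hhead : (l.dropWhile (fun x => x != c)).head hne = c := by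
    have := List.head_dropWhile_not (p := fun x => x != c) hne
    simpa using this
  have hdw := List.cons_head?_tail (List.head?_eq_some_head hne)
  rw [hhead] at hdw
  constructor
  · conv_lhs => rw [← List.takeWhile_append_dropWhile (p := fun x => x != c) (l := l)]
    conv_lhs => rw [← hdw]
  · intro hmem
    have := List.mem_takeWhile_imp hmem
    simp at this

lemma singleton_prefix_iff (c : Char) (l : List Char) : [c] <+: l ↔ l.head? = some c := by
  cases l with
  | nil => simp
  | cons a t => simp [List.cons_prefix_cons, eq_comm]

lemma find_char_append (pre rest : List Char) (c : Char) (h : c ∉ pre) :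
    PySem.Chars.find (pre ++ c :: rest) [c] = (pre.length : Int) := by
  have hinf : [c] <:+: (pre ++ c :: rest) := ⟨pre, rest, by simp⟩
  have h0 : 0 ≤ PySem.Chars.find (pre ++ c :: rest) [c] :=
    (PySem.Chars.find_nonneg_iff _ _).mpr hinf
  obtain ⟨hpref, hmin⟩ := PySem.Chars.find_spec h0
  set f := PySem.Chars.find (pre ++ c :: rest) [c] with hf
  have hnotlt : ¬ f.toNat < pre.length := by
    intro hlt
    have := (singleton_prefix_iff _ _).mp hpref
    rw [List.head?_drop] at this
    rw [List.getElem?_append_left hlt] at this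
    exact h (List.mem_of_getElem? this)
  have hnotgt : ¬ pre.length < f.toNat := by
    intro hlt
    apply hmin pre.length hlt
    rw [singleton_prefix_iff, List.head?_drop, List.getElem?_append_right (le_refl _)]
    simp
  omega

lemma find_char_none (cs : List Char) (c : Char) (h : c ∉ cs) :
    PySem.Chars.find cs [c] = -1 := by
  rw [PySem.Chars.find_eq_neg_one_iff]
  intro ⟨a, b, hab⟩
  exact h (by rw [← hab]; simp)

lemma paren_toList : ("(" : String).toList = ['('] := by decide
lemma cparen_toList : (")" : String).toList = [')'] := by decide

lemma push_append_ofList (s : String) (c : Char) (t : List Char) :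
    s.push c ++ String.ofList t = s ++ String.ofList (c :: t) := by
  rw [← String.toList_inj]; simp

lemma append_ofList_nil (s : String) : s ++ String.ofList [] = s := by
  rw [← String.toList_inj]; simp

lemma lookup_eq :
    ∀ (ks : List (List String)), (ks.all (fun kv => kv.length = 2)) = true →
      ∀ d : PySem.Dict String String,
        ks.foldl (fun d kv => match kv with | [k, v] => d.insert k v | _ => d) d
          = ks.foldl (fun d kv => d.insert (kv.headD "") (kv.tail.headD "")) d := by
  intro ks
  induction ks with
  | nil => intro _ _; rfl
  | cons kv t ih =>
    intro h d
    simp only [List.all_cons, Bool.and_eq_true] at h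
    obtain ⟨hkv, ht⟩ := h
    match kv, hkv with
    | [k, v], _ =>
      simp only [List.foldl_cons]
      exact ih ht _

lemma loopA (lookup : PySem.Dict String String) (cs : List Char) :
    ∀ fuel k (out : String), k ≤ cs.length → PreB (cs.drop k) →
      (cs.drop k).count '(' < fuel →
      evaluateLoopA lookup (String.ofList cs) (k : Int) out fuel
        = out ++ String.ofList (evalRef lookup (cs.drop k)) := by
  intro fuel
  induction fuel with
  | zero => intro k out _ _ hcount; omega
  | succ f ih =>
    intro k out hk hpre hcount
    by_cases h : '(' ∈ cs.drop k
    · -- a bracket pair is consumed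
      obtain ⟨hdec, hnp⟩ := split_first '(' (cs.drop k) h
      set pre := (cs.drop k).takeWhile (fun x => x != '(') with hpre_def
      set rest := ((cs.drop k).dropWhile (fun x => x != '(')).tail with hrest_def
      have hlen1 : (cs.drop k).length = cs.length - k := by simp
      have hlen2 : (cs.drop k).length = pre.length + 1 + rest.length := by
        rw [hdec]; simp; omega
      -- the matching ')' exists in rest, by PreB
      have hopen : (cs.drop k)[pre.length]? = some '(' := by
        rw [hdec, List.getElem?_append_right (le_refl _)]
        simp
      have hclose0 : ')' ∈ (cs.drop k).drop pre.length := hpre pre.length (by omega) hopen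
      have hdrop_pre : (cs.drop k).drop pre.length = '(' :: rest := by
        conv_lhs => rw [hdec]
        simp [List.drop_left]
      have hclose : ')' ∈ rest := by
        rw [hdrop_pre] at hclose0
        simpa using hclose0
      obtain ⟨hdec2, hnp2⟩ := split_first ')' rest hclose
      set key := rest.takeWhile (fun x => x != ')') with hkey_def
      set rest2 := (rest.dropWhile (fun x => x != ')')).tail with hrest2_def
      have hlen3 : rest.length = key.length + 1 + rest2.length := by
        rw [hdec2]; simp; omega
      have hk' : k + pre.length + 1 + rest.length = cs.length := by omega
      -- find "(" from k
      have hfind1 : PySem.Str.findFrom (String.ofList cs) "(" (k : Int)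
          = ((k + pre.length : Nat) : Int) := by
        rw [PySem.Str.findFrom_eq]
        simp only [String.toList_ofList, paren_toList]
        rw [PySem.Chars.findFrom_natCast cs ['('] k hk]
        have hfd : PySem.Chars.find (cs.drop k) ['('] = (pre.length : Int) := by
          conv_lhs => rw [hdec]
          exact find_char_append pre rest '(' hnp
        rw [hfd, if_neg (by omega)]
        push_cast; ring
      have hdrop_open : cs.drop (k + pre.length) = '(' :: rest := by
        rw [← List.drop_drop, hdrop_pre]
      have hfind2 : PySem.Str.findFrom (String.ofList cs) ")" ((k + pre.length : Nat) : Int)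
          = ((k + pre.length + key.length + 1 : Nat) : Int) := by
        rw [PySem.Str.findFrom_eq]
        simp only [String.toList_ofList, cparen_toList]
        rw [PySem.Chars.findFrom_natCast cs [')'] (k + pre.length) (by omega)]
        have hfd : PySem.Chars.find (cs.drop (k + pre.length)) [')']
            = ((key.length + 1 : Nat) : Int) := by
          rw [hdrop_open]
          conv_lhs => rw [hdec2]
          rw [show '(' :: (key ++ ')' :: rest2) = ('(' :: key) ++ ')' :: rest2 from by simp]
          have hnotin : ')' ∉ '(' :: key := by
            intro hm
            rcases List.mem_cons.mp hm with h1 | h1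
            · simp at h1
            · exact hnp2 h1
          have := find_char_append ('(' :: key) rest2 ')' hnotin
          simpa using this
        rw [hfd, if_neg (by omega)]
        push_cast; ring
      have hdrop1 : cs.drop (k + pre.length + 1) = rest := by
        rw [← List.drop_drop, hdrop_open, List.drop_one, List.tail_cons]
      have hdrop2 : cs.drop (k + pre.length + key.length + 2) = rest2 := by
        rw [show k + pre.length + key.length + 2 = (k + pre.length + 1) + (key.length + 1) from by omega,
          ← List.drop_drop, hdrop1]
        conv_lhs => rw [hdec2]
        rw [show key ++ ')' :: rest2 = (key ++ [')']) ++ rest2 from by simp]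
        rw [show key.length + 1 = (key ++ [')']).length from by simp]
        simp [List.drop_left]
      have hsubstr : PySem.Str.slice (String.ofList cs) (some (((k + pre.length : Nat) : Int) + 1))
          (some ((k + pre.length + key.length + 1 : Nat) : Int)) = String.ofList key := by
        rw [← String.toList_inj]
        simp only [PySem.Str.toList_slice, String.toList_ofList, PySem.Chars.slice_eq_listSlice]
        rw [show (((k + pre.length : Nat) : Int) + 1) = ((k + pre.length + 1 : Nat) : Int) from by
          push_cast; ring]
        rw [PySem.List.slice_natCast]
        rw [show (k + pre.length + key.length + 1) - (k + pre.length + 1) = key.length from by omega]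
        rw [hdrop1]
        conv_lhs => rw [hdec2]
        simp [List.take_left]
      have hout1 : PySem.Str.slice (String.ofList cs) (some (k : Int))
          (some ((k + pre.length : Nat) : Int)) = String.ofList pre := by
        rw [← String.toList_inj]
        simp only [PySem.Str.toList_slice, String.toList_ofList, PySem.Chars.slice_eq_listSlice]
        rw [PySem.List.slice_natCast]
        rw [show (k + pre.length) - k = pre.length from by omega]
        conv_lhs => rw [hdec]
        simp [List.take_left]
      have hpreB2 : PreB (cs.drop (k + pre.length + key.length + 2)) := by
        have h5 := preB_drop hpre (pre.length + key.length + 2)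
        rw [List.drop_drop] at h5
        rw [show k + pre.length + key.length + 2 = k + (pre.length + key.length + 2) from by omega]
        exact h5
      have hcount2 : (cs.drop (k + pre.length + key.length + 2)).count '(' < f := by
        rw [hdrop2]
        rw [hdec, hdec2] at hcount
        simp [List.count_append, List.count_cons] at hcount
        omega
      simp only [evaluateLoopA]
      rw [hfind1, if_neg (by omega), hfind2, hsubstr, hout1]
      have hbr : (if lookup.contains (String.ofList key) = true
            then out ++ String.ofList pre ++ lookup.getD (String.ofList key) "?"
            else out ++ String.ofList pre ++ "?")
          = out ++ String.ofList pre ++ lookup.getD (String.ofList key) "?" := by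
        by_cases hc : lookup.contains (String.ofList key) = true
        · rw [if_pos hc]
        · rw [if_neg hc, PySem.Dict.getD_of_not_contains _ _ (by simpa using hc)]
      rw [hbr]
      rw [show ((k + pre.length + key.length + 1 : Nat) : Int) + 1
          = ((k + pre.length + key.length + 2 : Nat) : Int) from by push_cast; ring]
      rw [ih (k + pre.length + key.length + 2)
        (out ++ String.ofList pre ++ lookup.getD (String.ofList key) "?")
        (by omega) hpreB2 hcount2]
      rw [hdrop2, ← String.toList_inj]
      conv_rhs => rw [evalRef, dif_pos h]
      simp [← hpre_def, ← hrest_def, ← hkey_def, ← hrest2_def, List.append_assoc]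
    · -- no '(' left: the loop exits and copies the tail
      have hfind : PySem.Str.findFrom (String.ofList cs) "(" (k : Int) = -1 := by
        rw [PySem.Str.findFrom_eq]
        simp only [String.toList_ofList, paren_toList]
        rw [PySem.Chars.findFrom_natCast cs ['('] k hk, find_char_none _ _ h]
        simp
      simp only [evaluateLoopA]
      rw [hfind, if_pos rfl]
      rw [← String.toList_inj]
      simp only [String.toList_append, PySem.Str.toList_slice, String.toList_ofList,
        PySem.Chars.slice_eq_listSlice, PySem.List.slice_from_natCast]
      rw [evalRef, dif_neg h]

lemma scanPlain (lookup : PySem.Dict String String) :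
    ∀ (cs : List Char), '(' ∉ cs →
      ∀ res buf, cs.foldl (scanStep lookup) (res, buf, false) = (res ++ String.ofList cs, buf, false) := by
  intro cs
  induction cs with
  | nil => intro _ res buf; simp [append_ofList_nil]
  | cons c t ih =>
    intro h res buf
    have hc : ¬ c = '(' := by intro he; exact h (he ▸ List.mem_cons_self ..)
    simp only [List.foldl_cons, scanStep, if_neg hc, Bool.false_eq_true, if_false]
    rw [ih (fun hm => h (List.mem_cons_of_mem _ hm)), push_append_ofList]

lemma scanKey (lookup : PySem.Dict String String) :
    ∀ (key : List Char), ')' ∉ key →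
      ∀ res buf, key.foldl (scanStep lookup) (res, buf, true) = (res, buf ++ String.ofList key, true) := by
  intro key
  induction key with
  | nil => intro _ res buf; simp [append_ofList_nil]
  | cons c t ih =>
    intro h res buf
    have hc : ¬ c = ')' := by intro he; exact h (he ▸ List.mem_cons_self ..)
    simp only [List.foldl_cons, scanStep, if_neg hc, if_true]
    rw [ih (fun hm => h (List.mem_cons_of_mem _ hm)), push_append_ofList]

lemma scanB (lookup : PySem.Dict String String) :
    ∀ (cs : List Char), PreB cs →
      ∀ res buf, (cs.foldl (scanStep lookup) (res, buf, false)).1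
        = res ++ String.ofList (evalRef lookup cs) := by
  have H : ∀ n (cs : List Char), cs.length ≤ n → PreB cs →
      ∀ res buf, (cs.foldl (scanStep lookup) (res, buf, false)).1
        = res ++ String.ofList (evalRef lookup cs) := by
    intro n
    induction n with
    | zero =>
      intro cs hlen _ res buf
      have : cs = [] := List.length_eq_zero_iff.mp (by omega)
      subst this
      simp [evalRef, append_ofList_nil]
    | succ n ih =>
      intro cs hlen hpre res buf
      by_cases h : '(' ∈ cs
      · obtain ⟨hdec, hnp⟩ := split_first '(' cs h
        set pre := cs.takeWhile (fun x => x != '(') with hpre_def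
        set rest := (cs.dropWhile (fun x => x != '(')).tail with hrest_def
        have hlen2 : cs.length = pre.length + 1 + rest.length := by
          conv_lhs => rw [hdec]
          simp; omega
        have hopen : cs[pre.length]? = some '(' := by
          rw [hdec, List.getElem?_append_right (le_refl _)]
          simp
        have hclose0 : ')' ∈ cs.drop pre.length := hpre pre.length (by omega) hopen
        have hdrop_pre : cs.drop pre.length = '(' :: rest := by
          conv_lhs => rw [hdec]
          simp [List.drop_left]
        have hclose : ')' ∈ rest := by
          rw [hdrop_pre] at hclose0
          simpa using hclose0
        obtain ⟨hdec2, hnp2⟩ := split_first ')' rest hclose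
        set key := rest.takeWhile (fun x => x != ')') with hkey_def
        set rest2 := (rest.dropWhile (fun x => x != ')')).tail with hrest2_def
        have hlen3 : rest.length = key.length + 1 + rest2.length := by
          conv_lhs => rw [hdec2]
          simp; omega
        have hpre2 : PreB rest2 := by
          have h5 := preB_drop hpre (pre.length + 1 + key.length + 1)
          have hdropeq : cs.drop (pre.length + 1 + key.length + 1) = rest2 := by
            conv_lhs => rw [hdec, hdec2]
            rw [show pre ++ '(' :: (key ++ ')' :: rest2)
                = (pre ++ '(' :: (key ++ [')'])) ++ rest2 from by simp]
            rw [show pre.length + 1 + key.length + 1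
                = (pre ++ '(' :: (key ++ [')'])).length from by simp; omega]
            simp [List.drop_left]
          rwa [hdropeq] at h5
        conv_lhs => rw [hdec, hdec2]
        rw [List.foldl_append, scanPlain lookup pre hnp res buf, List.foldl_cons]
        simp only [scanStep, Bool.false_eq_true, if_false, if_pos rfl, if_true]
        rw [List.foldl_append, scanKey lookup key hnp2, List.foldl_cons]
        simp only [scanStep, if_pos rfl, if_true]
        rw [ih rest2 (by omega) hpre2]
        rw [← String.toList_inj]
        conv_rhs => rw [evalRef, dif_pos h]
        simp [← hpre_def, ← hrest_def, ← hkey_def, ← hrest2_def, List.append_assoc]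
      · rw [(scanPlain lookup cs h res buf)]
        conv_rhs => rw [evalRef, dif_neg h]
  intro cs hpre res buf
  exact H cs.length cs (le_refl _) hpre res buf

-- ===== VERDICT =====
theorem evaluate_spec : Claim_equal_evaluate := by
  intro s knowledge _ hpre
  unfold Spec_evaluate
  simp only [evaluate, evaluate_alt]
  rw [lookup_eq knowledge hpre.1]
  have hpreB : PreB s.toList := hpre.2
  have h1 := loopA
    (knowledge.foldl (fun d kv => d.insert (kv.headD "") (kv.tail.headD "")) PySem.Dict.empty)
    s.toList (s.toList.length + 1) 0 ""
    (by omega) (by simpa using hpreB)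
    (by simp only [List.drop_zero]; exact Nat.lt_succ_of_le List.count_le_length)
  rw [String.ofList_toList, Nat.cast_zero, List.drop_zero] at h1
  have h2 := scanB
    (knowledge.foldl (fun d kv => d.insert (kv.headD "") (kv.tail.headD "")) PySem.Dict.empty)
    s.toList hpreB "" ""
  rw [h1, h2]
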